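-- pv_equiv track=rewrite | github.com/Jeldo/PS | leetcode/solved/1395.py | numTeams2
-- ===== SOURCE A (Python) =====
-- from itertools import combinations
--
-- def numTeams2(rating: list):
--     if len(rating) < 3:
--         return 0
--     count = 0
--     for c in combinations(rating, 3):
--         is_ascending = True
--         is_descending = True
--         for i in range(0, 2):
--             if c[i] > c[i+1]:
--                 is_ascending = False
--             if c[i] < c[i+1]:
--                 is_descending = False
--         if is_ascending:
--             count += 1
--         if is_descending:
--             count += 1
--     return count
-- ===== SOURCE B (Python) =====
-- def numTeams2(rating: list):
--     # O(n^2): for each middle element, count qualifying elements left/right and multiply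
--     total = 0
--     for j, x in enumerate(rating):
--         la = lb = 0
--         for v in rating[:j]:
--             if v <= x:
--                 la += 1
--             if v >= x:
--                 lb += 1
--         ra = rb = 0
--         for v in rating[j+1:]:
--             if x <= v:
--                 ra += 1
--             if x >= v:
--                 rb += 1
--         total += la * ra + lb * rb
--     return total
-- ===== Notes on version B (the rewrite author's own statement) =====
-- stated objective: faster
-- what changed: Instead of enumerating all O(n^3) triples, B iterates over each middle element and multiplies the counts of qualifying elements to its left and right.
import Mathlib
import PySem

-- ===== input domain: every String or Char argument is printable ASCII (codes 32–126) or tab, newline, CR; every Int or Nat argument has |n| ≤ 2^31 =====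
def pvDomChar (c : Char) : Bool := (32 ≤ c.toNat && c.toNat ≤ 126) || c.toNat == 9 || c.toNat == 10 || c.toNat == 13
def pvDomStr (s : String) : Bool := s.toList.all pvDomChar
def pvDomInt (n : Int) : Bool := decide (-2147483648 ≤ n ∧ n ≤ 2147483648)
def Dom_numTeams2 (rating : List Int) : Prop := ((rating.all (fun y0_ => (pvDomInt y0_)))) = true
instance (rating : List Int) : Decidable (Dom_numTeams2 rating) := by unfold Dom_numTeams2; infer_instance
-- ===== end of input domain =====

-- B replaces A's enumeration of all O(n^3) triples by an O(n^2) per-middle-element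
-- count-and-multiply pass; same return value (objective: faster).

-- ===== PORT A =====
-- itertools.combinations(rating, 2) / (rating, 3), in Python's order
def combos2 : List Int → List (Int × Int)
  | [] => []
  | x :: xs => xs.map (fun y => (x, y)) ++ combos2 xs

def combos3 : List Int → List (Int × Int × Int)
  | [] => []
  | x :: xs => (combos2 xs).map (fun p => (x, p.1, p.2)) ++ combos3 xs

def numTeams2 (rating : List Int) : Int :=
  if rating.length < 3 then 0
  else
    (combos3 rating).foldl (fun count c =>
      -- inner loop: for i in range(0, 2) over the two adjacent pairs of c
      let flags := [(c.1, c.2.1), (c.2.1, c.2.2)].foldl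
        (fun (fl : Bool × Bool) pr =>
          (if pr.1 > pr.2 then false else fl.1,
           if pr.1 < pr.2 then false else fl.2))
        (true, true)
      let count := if flags.1 then count + 1 else count
      if flags.2 then count + 1 else count) 0

-- ===== PORT B =====
-- sum(1 for v in l if p v)
def cnt (l : List Int) (p : Int → Bool) : Int :=
  l.foldl (fun s v => if p v then s + 1 else s) 0

-- the loop over middle positions j: left = rating[:j], rest = rating[j+1:]
def altGo (left : List Int) : List Int → Int
  | [] => 0
  | x :: xs =>
      cnt left (fun v => v ≤ x) * cnt xs (fun v => x ≤ v)
      + cnt left (fun v => v ≥ x) * cnt xs (fun v => x ≥ v)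
      + altGo (left ++ [x]) xs

def numTeams2_alt (rating : List Int) : Int := altGo [] rating

-- ===== PRECONDITION & SPEC =====
def Spec_numTeams2 (rating : List Int) (out : Int) : Prop := out = numTeams2_alt rating
instance (rating : List Int) (out : Int) : Decidable (Spec_numTeams2 rating out) := by unfold Spec_numTeams2; infer_instance

-- ===== CLAIM (what is proved, stated in full; the proofs are below) =====
def Claim_equal_numTeams2 : Prop := ∀ (rating : List Int), Dom_numTeams2 rating → Spec_numTeams2 rating (numTeams2 rating)

-- ===== LEMMAS AND PROOFS =====

-- contribution of one triple in A
def ftr (a b c : Int) : Int :=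
  (if a ≤ b ∧ b ≤ c then 1 else 0) + (if a ≥ b ∧ b ≥ c then 1 else 0)

def Ssum (l : List Int) : Int := ((combos3 l).map (fun c => ftr c.1 c.2.1 c.2.2)).sum
def Psum (a : Int) (l : List Int) : Int := ((combos2 l).map (fun p => ftr a p.1 p.2)).sum

theorem cnt_shift (p : Int → Bool) (l : List Int) (s : Int) :
    l.foldl (fun s v => if p v then s + 1 else s) s
      = s + l.foldl (fun s v => if p v then s + 1 else s) 0 := by
  induction l generalizing s with
  | nil => simp
  | cons a l ih =>
    simp only [List.foldl]
    rw [ih, ih (if p a then (0:Int) + 1 else 0)]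
    split <;> ring

theorem cnt_cons (p : Int → Bool) (a : Int) (l : List Int) :
    cnt (a :: l) p = (if p a then 1 else 0) + cnt l p := by
  simp only [cnt, List.foldl]
  rw [cnt_shift]
  split <;> ring

theorem ftr_split (a x c : Int) :
    ftr a x c = (if a ≤ x then 1 else 0) * (if x ≤ c then 1 else 0)
      + (if a ≥ x then 1 else 0) * (if x ≥ c then 1 else 0) := by
  simp only [ftr]
  split_ifs <;> omega

theorem row_sum (a x : Int) (R : List Int) :
    (R.map (fun c => ftr a x c)).sum
      = (if a ≤ x then 1 else 0) * cnt R (fun v => x ≤ v)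
        + (if a ≥ x then 1 else 0) * cnt R (fun v => x ≥ v) := by
  induction R with
  | nil => simp [cnt]
  | cons c R ih =>
    rw [List.map_cons, List.sum_cons, ih, cnt_cons, cnt_cons, ftr_split]
    simp only [decide_eq_true_eq]
    ring

theorem key (x : Int) (L R : List Int) :
    cnt L (fun v => v ≤ x) * cnt R (fun v => x ≤ v)
      + cnt L (fun v => v ≥ x) * cnt R (fun v => x ≥ v)
      = (L.map (fun a => (R.map (fun c => ftr a x c)).sum)).sum := by
  induction L with
  | nil => simp [cnt]
  | cons a L ih =>
    rw [List.map_cons, List.sum_cons, row_sum, ← ih, cnt_cons, cnt_cons]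
    simp only [decide_eq_true_eq]
    ring

theorem Psum_cons (a x : Int) (xs : List Int) :
    Psum a (x :: xs) = (xs.map (fun c => ftr a x c)).sum + Psum a xs := by
  simp [Psum, combos2, Function.comp_def]

theorem Ssum_cons (x : Int) (xs : List Int) :
    Ssum (x :: xs) = Psum x xs + Ssum xs := by
  simp [Ssum, Psum, combos3, Function.comp_def]

theorem altGo_eq (l left : List Int) :
    altGo left l = (left.map (fun a => Psum a l)).sum + Ssum l := by
  induction l generalizing left with
  | nil => simp [altGo, Ssum, Psum, combos3, combos2]
  | cons x xs ih =>
    rw [altGo, ih, Ssum_cons]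
    simp only [List.map_append, List.sum_append, List.map, List.sum_cons, List.sum_nil]
    rw [key]
    have : (left.map (fun a => Psum a (x :: xs))).sum
        = (left.map (fun a => (xs.map (fun c => ftr a x c)).sum)).sum
          + (left.map (fun a => Psum a xs)).sum := by
      induction left with
      | nil => simp
      | cons b left ihl =>
        rw [List.map_cons, List.map_cons, List.map_cons, List.sum_cons, List.sum_cons,
          List.sum_cons, Psum_cons, ihl]
        ring
    rw [this]; ring

theorem step_eq (s : Int) (c : Int × Int × Int) :
    (let flags := [(c.1, c.2.1), (c.2.1, c.2.2)].foldl
        (fun (fl : Bool × Bool) pr =>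
          (if pr.1 > pr.2 then false else fl.1,
           if pr.1 < pr.2 then false else fl.2))
        (true, true)
     let count := if flags.1 then s + 1 else s
     if flags.2 then count + 1 else count) = s + ftr c.1 c.2.1 c.2.2 := by
  obtain ⟨a, b, d⟩ := c
  simp only [List.foldl, ftr]
  split_ifs <;> simp_all <;> omega

theorem foldA_eq (cs : List (Int × Int × Int)) (s : Int) :
    cs.foldl (fun count c =>
      let flags := [(c.1, c.2.1), (c.2.1, c.2.2)].foldl
        (fun (fl : Bool × Bool) pr =>
          (if pr.1 > pr.2 then false else fl.1,
           if pr.1 < pr.2 then false else fl.2))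
        (true, true)
      let count := if flags.1 then count + 1 else count
      if flags.2 then count + 1 else count) s
    = s + (cs.map (fun c => ftr c.1 c.2.1 c.2.2)).sum := by
  induction cs generalizing s with
  | nil => simp
  | cons c cs ih =>
    rw [List.foldl_cons, List.map_cons, List.sum_cons, ih, step_eq]
    ring

theorem short_Ssum (rating : List Int) (h : rating.length < 3) : Ssum rating = 0 := by
  match rating, h with
  | [], _ => simp [Ssum, combos3]
  | [a], _ => simp [Ssum, combos3, combos2]
  | [a, b], _ => simp [Ssum, combos3, combos2]

-- ===== VERDICT (by name: the statement is the Claim_ definition above) =====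
theorem numTeams2_spec : Claim_equal_numTeams2 := by
  intro rating _
  show numTeams2 rating = numTeams2_alt rating
  rw [numTeams2_alt, altGo_eq]
  simp only [List.map_nil, List.sum_nil, zero_add]
  unfold numTeams2
  split
  · rw [short_Ssum rating (by omega)]
  · rw [foldA_eq]; simp [Ssum]
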